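-- pv_equiv track=rewrite | github.com/faterazer/LeetCode | 3886. Sum of Sortable Integers/Solution.py | sortableIntegers
-- ===== SOURCE A (Python) =====
-- from math import isqrt
--
-- def sortableIntegers(nums: list[int]) -> int:
--     n = len(nums)
--     next_dec = [n] * n
--     p = n
--     for i in range(n - 2, -1, -1):
--         if nums[i] > nums[i + 1]:
--             p = i
--         next_dec[i] = p
--
--     def solve(k: int) -> bool:
--         last_max = 0
--         for r in range(k - 1, n, k):
--             l = r + 1 - k
--             m = next_dec[l]
--             if m >= r:
--                 if last_max > nums[l]:
--                     return False
--                 last_max = nums[r]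
--             else:
--                 if next_dec[m + 1] < r or last_max > nums[m + 1] or nums[r] > nums[l]:
--                     return False
--                 last_max = nums[m]
--         return True
--
--     result = 0
--     for k in range(1, isqrt(n) + 1):
--         if n % k == 0:
--             if solve(k):
--                 result += k
--             if k * k < n and solve(n // k):
--                 result += n // k
--     return result
-- ===== SOURCE B (Python) =====
-- from math import isqrt
--
-- def sortableIntegers(nums: list[int]) -> int:
--     n = len(nums)
--
--     def solve(k: int) -> bool:
--         last_max = 0
--         for l in range(0, n, k):
--             r = l + k - 1
--             descents = [i for i in range(l, r) if nums[i] > nums[i + 1]]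
--             if len(descents) == 0:
--                 if last_max > nums[l]:
--                     return False
--                 last_max = nums[r]
--             elif len(descents) == 1:
--                 m = descents[0]
--                 if last_max > nums[m + 1] or nums[r] > nums[l]:
--                     return False
--                 last_max = nums[m]
--             else:
--                 return False
--         return True
--
--     result = 0
--     for k in range(1, isqrt(n) + 1):
--         if n % k == 0:
--             if solve(k):
--                 result += k
--             if k * k < n and solve(n // k):
--                 result += n // k
--     return result
-- ===== Notes on version B (the rewrite author's own statement) =====
-- stated objective: alternative
-- what changed: Removed the precomputed next-descent table; each block is checked by scanning it directly for its descent positions (0, 1 or >=2 descents), keeping the divisor loop and last_max threading.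
import Mathlib
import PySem

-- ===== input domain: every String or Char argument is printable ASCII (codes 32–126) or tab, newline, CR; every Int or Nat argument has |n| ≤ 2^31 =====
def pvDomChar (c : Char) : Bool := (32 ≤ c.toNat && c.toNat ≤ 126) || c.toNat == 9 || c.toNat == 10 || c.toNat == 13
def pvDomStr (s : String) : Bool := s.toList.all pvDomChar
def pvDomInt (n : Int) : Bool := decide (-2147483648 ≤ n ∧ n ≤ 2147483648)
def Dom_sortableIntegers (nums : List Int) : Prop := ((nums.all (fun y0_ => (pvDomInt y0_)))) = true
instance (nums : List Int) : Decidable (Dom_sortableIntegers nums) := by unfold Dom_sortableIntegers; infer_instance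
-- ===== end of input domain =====

-- B replaces A's precomputed next-descent table by a direct per-block scan for descent
-- positions (alternative decomposition, same divisor loop); proved to return A's exact value.

-- ===== PORT A =====
-- the countdown loop 'for i in range(n-2, -1, -1)' as structural recursion on the index:
-- pvBuildGo nums (j+1) st runs the body for index j, then continues with j-1, …, 0
def pvBuildGo (nums : List Int) : Nat → (List Int × Int) → (List Int × Int)
  | 0, st => st
  | j+1, st =>
      let p' := if PySem.List.pyGetD nums (j : Int) 0 > PySem.List.pyGetD nums ((j : Int)+1) 0
                then (j : Int) else st.2
      pvBuildGo nums j (PySem.List.pySetD st.1 (j : Int) p', p')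

-- next_dec = [n]*n; p = n; the loop body fills it in
def pvNd (nums : List Int) : List Int :=
  (pvBuildGo nums (nums.length - 1)
    (List.replicate nums.length (nums.length : Int), (nums.length : Int))).1

-- solve(k) of A: loop over r in range(k-1, n, k); state Option Int = some last_max / none = returned False
def pvStepA (nums nd : List Int) (k : Int) (st : Option Int) (r : Int) : Option Int :=
  match st with
  | none => none
  | some lastMax =>
    let l := r + 1 - k
    let m := PySem.List.pyGetD nd l 0
    if m ≥ r then
      if lastMax > PySem.List.pyGetD nums l 0 then none
      else some (PySem.List.pyGetD nums r 0)
    else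
      if PySem.List.pyGetD nd (m+1) 0 < r ∨ lastMax > PySem.List.pyGetD nums (m+1) 0 ∨
         PySem.List.pyGetD nums r 0 > PySem.List.pyGetD nums l 0 then none
      else some (PySem.List.pyGetD nums m 0)

def pvSolveA (nums nd : List Int) (k : Int) : Bool :=
  ((PySem.List.pyRange (k-1) (nums.length : Int) k).foldl (pvStepA nums nd k) (some 0)).isSome

def sortableIntegers (nums : List Int) : Int :=
  let n : Int := nums.length
  let nd := pvNd nums
  (PySem.List.pyRange 1 ((Nat.sqrt nums.length : Int) + 1) 1).foldl
    (fun result k =>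
      if PySem.Int.mod n k = 0 then
        let result := if pvSolveA nums nd k then result + k else result
        if k * k < n ∧ pvSolveA nums nd (PySem.Int.floordiv n k) then
          result + PySem.Int.floordiv n k
        else result
      else result) 0

-- ===== PORT B =====
-- solve(k) of B: loop over block starts l in range(0, n, k); scan the block for descent positions
def pvStepB (nums : List Int) (k : Int) (st : Option Int) (l : Int) : Option Int :=
  match st with
  | none => none
  | some lastMax =>
    let r := l + k - 1
    let descents := (PySem.List.pyRange l r 1).filter
      (fun i => decide (PySem.List.pyGetD nums i 0 > PySem.List.pyGetD nums (i+1) 0))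
    match descents with
    | [] =>
        if lastMax > PySem.List.pyGetD nums l 0 then none
        else some (PySem.List.pyGetD nums r 0)
    | [m] =>
        if lastMax > PySem.List.pyGetD nums (m+1) 0 ∨
           PySem.List.pyGetD nums r 0 > PySem.List.pyGetD nums l 0 then none
        else some (PySem.List.pyGetD nums m 0)
    | _ => none

def pvSolveB (nums : List Int) (k : Int) : Bool :=
  ((PySem.List.pyRange 0 (nums.length : Int) k).foldl (pvStepB nums k) (some 0)).isSome

def sortableIntegers_alt (nums : List Int) : Int :=
  let n : Int := nums.length
  (PySem.List.pyRange 1 ((Nat.sqrt nums.length : Int) + 1) 1).foldl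
    (fun result k =>
      if PySem.Int.mod n k = 0 then
        let result := if pvSolveB nums k then result + k else result
        if k * k < n ∧ pvSolveB nums (PySem.Int.floordiv n k) then
          result + PySem.Int.floordiv n k
        else result
      else result) 0

-- ===== PRECONDITION & SPEC =====
def Spec_sortableIntegers (nums : List Int) (out : Int) : Prop := out = sortableIntegers_alt nums
instance (nums : List Int) (out : Int) : Decidable (Spec_sortableIntegers nums out) := by unfold Spec_sortableIntegers; infer_instance

-- ===== CLAIM (what is proved, stated in full; the proofs are below) =====
def Claim_equal_sortableIntegers : Prop := ∀ (nums : List Int), Dom_sortableIntegers nums → Spec_sortableIntegers nums (sortableIntegers nums)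

-- ===== LEMMAS AND PROOFS =====

-- first descent position at or after i (n if none): the value next_dec[i] holds
def pvFd (nums : List Int) (i : Nat) : Nat :=
  if h : i + 1 < nums.length then
    (if nums.getD i 0 > nums.getD (i+1) 0 then i else pvFd nums (i+1))
  else nums.length
termination_by nums.length - i

lemma pvFd_ge (nums : List Int) (i : Nat) (hi : i ≤ nums.length) : i ≤ pvFd nums i := by
  rw [pvFd]
  split
  next h =>
    split
    · omega
    · exact le_trans (by omega) (pvFd_ge nums (i+1) (by omega))
  next h => omega
termination_by nums.length - i

lemma pvFd_no_descent (nums : List Int) (i j : Nat) (hij : i ≤ j) (hj : j < pvFd nums i)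
    (hjn : j + 1 < nums.length) : ¬ nums.getD j 0 > nums.getD (j+1) 0 := by
  rw [pvFd] at hj
  split at hj
  next h1 =>
    split at hj
    next h2 =>
      exact absurd hij (by omega)
    next h2 =>
      rcases Nat.eq_or_lt_of_le hij with rfl | hlt
      · exact h2
      · exact pvFd_no_descent nums (i+1) j (by omega) hj hjn
  next h1 => omega
termination_by nums.length - i

lemma pvFd_descent (nums : List Int) (i : Nat) (h : pvFd nums i < nums.length) :
    nums.getD (pvFd nums i) 0 > nums.getD (pvFd nums i + 1) 0 := by
  by_cases h1 : i + 1 < nums.length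
  · by_cases h2 : nums.getD i 0 > nums.getD (i+1) 0
    · have e : pvFd nums i = i := by rw [pvFd, dif_pos h1, if_pos h2]
      rw [e]; exact h2
    · have e : pvFd nums i = pvFd nums (i+1) := by rw [pvFd, dif_pos h1, if_neg h2]
      rw [e] at h ⊢
      exact pvFd_descent nums (i+1) h
  · have e : pvFd nums i = nums.length := by rw [pvFd, dif_neg h1]
    omega
termination_by nums.length - i

lemma pvBuildGo_inv (nums : List Int) (j : Nat) :
    ∀ (st : List Int × Int), j ≤ nums.length - 1 →
    st.1.length = nums.length →
    st.2 = ((pvFd nums j : Nat) : Int) →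
    (∀ i : Nat, i < nums.length → PySem.List.pyGetD st.1 (i : Int) 0 =
        if j ≤ i then ((pvFd nums i : Nat) : Int) else (nums.length : Int)) →
    ∀ i : Nat, i < nums.length →
      PySem.List.pyGetD (pvBuildGo nums j st).1 (i : Int) 0 = ((pvFd nums i : Nat) : Int) := by
  induction j with
  | zero =>
    intro st hj hlen hp hvals i hi
    simpa [pvBuildGo] using hvals i hi
  | succ j ih =>
    intro st hj hlen hp hvals i hi
    have hjn : j + 1 < nums.length := by omega
    simp only [pvBuildGo]
    have hcast : ((j : Int) + 1) = ((j + 1 : Nat) : Int) := by push_cast; ring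
    rw [hcast]
    set p' := (if PySem.List.pyGetD nums (j : Int) 0 > PySem.List.pyGetD nums ((j + 1 : Nat) : Int) 0
               then (j : Int) else st.2) with hp'
    have hpj : p' = ((pvFd nums j : Nat) : Int) := by
      rw [hp', pvFd, dif_pos hjn, hp]
      simp only [PySem.List.pyGetD_natCast]
      split_ifs with hd
      · rfl
      · rfl
    apply ih (PySem.List.pySetD st.1 (j : Int) p', p') (by omega)
    · simpa [PySem.List.pySetD_natCast] using hlen
    · exact hpj
    · intro i hi
      have hjlen : j < st.1.length := by omega
      rw [PySem.List.pyGetD_pySetD_natCast st.1 j i p' 0 hjlen]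
      by_cases hij : i = j
      · subst hij; simp [hpj]
      · rw [if_neg hij, hvals i hi]
        split_ifs with h1 h2 h2 <;> first | rfl | omega
    · exact hi

-- the table built by A's loop holds exactly pvFd
lemma pvNd_spec (nums : List Int) (i : Nat) (hi : i < nums.length) :
    PySem.List.pyGetD (pvNd nums) (i : Int) 0 = ((pvFd nums i : Nat) : Int) := by
  have hn : 1 ≤ nums.length := by omega
  have hfdlast : pvFd nums (nums.length - 1) = nums.length := by
    rw [pvFd, dif_neg (by omega)]
  apply pvBuildGo_inv nums (nums.length - 1) _ (le_refl _) (by simp) (by simp [hfdlast]) _ i hi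
  intro i hi
  have : PySem.List.pyGetD (List.replicate nums.length ((nums.length : Nat) : Int)) (i : Int) 0
      = (nums.length : Int) := by
    rw [PySem.List.pyGetD_natCast]
    simp [List.getD, hi]
  rw [this]
  split_ifs with h
  · have : i = nums.length - 1 := by omega
    subst this
    rw [hfdlast]
  · rfl

-- descent scan of B: characterization of the filtered list
def pvDlist (nums : List Int) (l r : Nat) : List Int :=
  (PySem.List.pyRange (l : Int) (r : Int) 1).filter
    (fun i => decide (PySem.List.pyGetD nums i 0 > PySem.List.pyGetD nums (i+1) 0))

lemma pvDlist_nil (nums : List Int) (l r : Nat) (hr : r < nums.length)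
    (hfd : r ≤ pvFd nums l) : pvDlist nums l r = [] := by
  unfold pvDlist
  rw [List.filter_eq_nil_iff]
  intro x hx
  rw [PySem.List.mem_pyRange_one] at hx
  obtain ⟨h1, h2⟩ := hx
  have hx0 : 0 ≤ x := le_trans (by positivity) h1
  obtain ⟨j, rfl⟩ : ∃ j : Nat, x = (j : Int) := ⟨x.toNat, (Int.toNat_of_nonneg hx0).symm⟩
  have hlj : l ≤ j := by exact_mod_cast h1
  have hjr : j < r := by exact_mod_cast h2
  have hcast : ((j : Int) + 1) = ((j + 1 : Nat) : Int) := by push_cast; ring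
  simp only [hcast, PySem.List.pyGetD_natCast, decide_eq_true_eq]
  exact pvFd_no_descent nums l j hlj (by omega) (by omega)

lemma pvDlist_cons (nums : List Int) (l r : Nat) (hr : r ≤ nums.length)
    (hfd : pvFd nums l < r) :
    pvDlist nums l r = ((pvFd nums l : Nat) : Int) :: pvDlist nums (pvFd nums l + 1) r := by
  have hfdn : pvFd nums l < nums.length := by omega
  have hln : l ≤ nums.length := by
    by_contra hc
    have : pvFd nums l = nums.length := by rw [pvFd, dif_neg (by omega)]
    omega
  have hlfd : l ≤ pvFd nums l := pvFd_ge nums l hln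
  unfold pvDlist
  have hnil : pvDlist nums l (pvFd nums l) = [] :=
    pvDlist_nil nums l (pvFd nums l) hfdn (le_refl _)
  unfold pvDlist at hnil
  rw [PySem.List.pyRange_one_append (l : Int) ((pvFd nums l : Nat) : Int) (r : Int)
        (by exact_mod_cast hlfd) (by exact_mod_cast le_of_lt hfd),
      List.filter_append, hnil, List.nil_append,
      PySem.List.pyRange_one_cons (by exact_mod_cast hfd),
      List.filter_cons]
  have hcast : ((pvFd nums l : Nat) : Int) + 1 = ((pvFd nums l + 1 : Nat) : Int) := by
    push_cast; ring
  rw [hcast]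
  have hdec : nums.getD (pvFd nums l) 0 > nums.getD (pvFd nums l + 1) 0 :=
    pvFd_descent nums l hfdn
  simp only [PySem.List.pyGetD_natCast, decide_eq_true_eq, if_pos hdec]

-- general-step range lemmas
lemma pvRange_nil_of_pos {a b k : Int} (hk : 0 < k) (hab : b ≤ a) :
    PySem.List.pyRange a b k = [] := by
  rw [PySem.List.pyRange_of_pos a b hk, if_neg (by omega)]
  simp

lemma pvRange_cons_of_pos {a b k : Int} (hk : 0 < k) (hab : a < b) :
    PySem.List.pyRange a b k = a :: PySem.List.pyRange (a+k) b k := by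
  rw [PySem.List.pyRange_of_pos a b hk, PySem.List.pyRange_of_pos (a+k) b hk, if_pos hab]
  by_cases h2 : a + k < b
  · rw [if_pos h2]
    have hdiv : (b - a + k - 1) / k = (b - (a + k) + k - 1) / k + 1 := by
      have := Int.add_mul_ediv_right (b - (a + k) + k - 1) 1 (by omega : k ≠ 0)
      rw [← this]; ring_nf
    have hpos : 0 ≤ (b - (a + k) + k - 1) / k := by
      apply Int.ediv_nonneg (by omega) (by omega)
    rw [hdiv]
    have : ((b - (a + k) + k - 1) / k + 1).toNat = ((b - (a + k) + k - 1) / k).toNat + 1 := by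
      omega
    rw [this, List.range_succ_eq_map, List.map_cons, List.map_map]
    congr 1
    · simp
    · apply List.map_congr_left
      intro x _
      simp only [Function.comp_apply]
      push_cast
      ring
  · rw [if_neg h2]
    have hone : (b - a + k - 1) / k = 1 := by
      have h1 : 1 ≤ (b - a + k - 1) / k := by
        rw [Int.le_ediv_iff_mul_le hk]; omega
      have h2' : (b - a + k - 1) / k < 2 := by
        rw [Int.ediv_lt_iff_lt_mul hk]; omega
      omega
    rw [hone]
    simp

-- one block: A's table step equals B's scan step
lemma pvStep_eq (nums : List Int) (k l : Nat) (hk : 1 ≤ k) (hr : l + k ≤ nums.length)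
    (acc : Option Int) :
    pvStepA nums (pvNd nums) (k : Int) acc ((l : Int) + (k : Int) - 1)
      = pvStepB nums (k : Int) acc (l : Int) := by
  cases acc with
  | none => rfl
  | some lastMax =>
    have hrn : l + k - 1 < nums.length := by omega
    have er : ((l : Int) + (k : Int) - 1) = ((l + k - 1 : Nat) : Int) := by omega
    simp only [pvStepA, pvStepB]
    have el : ((l : Int) + (k : Int) - 1) + 1 - (k : Int) = (l : Int) := by ring
    rw [el, er, pvNd_spec nums l (by omega)]
    have hD : List.filter (fun i => decide (PySem.List.pyGetD nums i 0 > PySem.List.pyGetD nums (i + 1) 0))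
        (PySem.List.pyRange (l : Int) ((l + k - 1 : Nat) : Int)) = pvDlist nums l (l + k - 1) := rfl
    rw [hD]
    by_cases hge : l + k - 1 ≤ pvFd nums l
    · rw [pvDlist_nil nums l (l + k - 1) hrn hge, if_pos (by exact_mod_cast hge)]
    · push Not at hge
      rw [pvDlist_cons nums l (l + k - 1) (by omega) hge]
      have hfd1 : ((pvFd nums l : Nat) : Int) + 1 = ((pvFd nums l + 1 : Nat) : Int) := by
        push_cast; ring
      rw [if_neg (by exact_mod_cast not_le.mpr hge), hfd1,
          pvNd_spec nums (pvFd nums l + 1) (by omega)]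
      by_cases h2 : pvFd nums (pvFd nums l + 1) < l + k - 1
      · rw [pvDlist_cons nums (pvFd nums l + 1) (l + k - 1) (by omega) h2,
            if_pos (Or.inl (by exact_mod_cast h2))]
      · push Not at h2
        rw [pvDlist_nil nums (pvFd nums l + 1) (l + k - 1) hrn h2]
        have hfalse : ¬ ((pvFd nums (pvFd nums l + 1) : Nat) : Int) < ((l + k - 1 : Nat) : Int) := by
          exact_mod_cast not_lt.mpr h2
        simp only [hfalse, false_or, hfd1]

lemma pvFold_blocks (nums : List Int) (k : Nat) (hk : 1 ≤ k) :
    ∀ (c l : Nat) (acc : Option Int), nums.length = l + c * k →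
    (PySem.List.pyRange ((l : Int) + (k : Int) - 1) (nums.length : Int) (k : Int)).foldl
        (pvStepA nums (pvNd nums) (k : Int)) acc
      = (PySem.List.pyRange (l : Int) (nums.length : Int) (k : Int)).foldl
        (pvStepB nums (k : Int)) acc := by
  have hkpos : (0 : Int) < (k : Int) := by exact_mod_cast hk
  intro c
  induction c with
  | zero =>
    intro l acc h
    rw [pvRange_nil_of_pos hkpos (by omega), pvRange_nil_of_pos hkpos (by omega)]
    rfl
  | succ c ih =>
    intro l acc h
    rw [Nat.succ_mul] at h
    have hlk : l + k ≤ nums.length := by omega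
    have e1 : (l : Int) + (k : Int) - 1 + (k : Int) = ((l + k : Nat) : Int) + (k : Int) - 1 := by
      push_cast; ring
    have e2 : (l : Int) + (k : Int) = ((l + k : Nat) : Int) := by push_cast; ring
    rw [pvRange_cons_of_pos (a := (l : Int) + (k : Int) - 1) (b := (nums.length : Int)) hkpos (by omega),
        pvRange_cons_of_pos (a := ((l : Nat) : Int)) (b := (nums.length : Int)) hkpos (by omega),
        List.foldl_cons, List.foldl_cons, pvStep_eq nums k l hk hlk acc, e1, e2]
    exact ih (l + k) _ (by omega)

lemma pvSolve_eq (nums : List Int) (k : Nat) (hk : 1 ≤ k) (hdvd : k ∣ nums.length) :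
    pvSolveA nums (pvNd nums) (k : Int) = pvSolveB nums (k : Int) := by
  obtain ⟨c, hc⟩ := hdvd
  unfold pvSolveA pvSolveB
  have hfold := pvFold_blocks nums k hk c 0 (some 0) (by rw [Nat.mul_comm] at hc; omega)
  simp only [Nat.cast_zero, zero_add] at hfold
  rw [hfold]

-- ===== VERDICT (by name: the statement is the Claim_ definition above) =====
theorem sortableIntegers_spec : Claim_equal_sortableIntegers := by
  intro nums _
  unfold Spec_sortableIntegers
  simp only [sortableIntegers, sortableIntegers_alt]
  apply PySem.List.foldl_congr_mem
  intro acc x hx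
  rw [PySem.List.mem_pyRange_one] at hx
  obtain ⟨h1, h2⟩ := hx
  by_cases hmod : PySem.Int.mod (nums.length : Int) x = 0
  · have hdvd : x ∣ (nums.length : Int) := (PySem.Int.mod_eq_zero_iff_dvd _ _).mp hmod
    have hx0 : x = ((x.toNat : Nat) : Int) := (Int.toNat_of_nonneg (by omega)).symm
    have hsq : (1 : Int) ≤ ((Nat.sqrt nums.length : Nat) : Int) := by omega
    have hn1 : 1 ≤ nums.length := by
      by_contra hc
      have h0 : nums.length = 0 := by omega
      rw [h0] at hsq
      simp [Nat.sqrt] at hsq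
    have hkt1 : 1 ≤ x.toNat := by omega
    have hdvdN : x.toNat ∣ nums.length := by
      rw [hx0] at hdvd
      exact_mod_cast hdvd
    have e1 : pvSolveA nums (pvNd nums) x = pvSolveB nums x := by
      rw [hx0]
      exact pvSolve_eq nums x.toNat hkt1 hdvdN
    have efd : PySem.Int.floordiv (nums.length : Int) x
        = ((nums.length / x.toNat : Nat) : Int) := by
      rw [hx0]
      exact PySem.Int.floordiv_natCast _ _
    have e2 : pvSolveA nums (pvNd nums) (PySem.Int.floordiv (nums.length : Int) x)
        = pvSolveB nums (PySem.Int.floordiv (nums.length : Int) x) := by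
      rw [efd]
      refine pvSolve_eq nums _ ?_ (Nat.div_dvd_of_dvd hdvdN)
      have hxn : x.toNat ≤ nums.length := Nat.le_of_dvd (by omega) hdvdN
      exact (Nat.one_le_div_iff (by omega)).mpr hxn
    simp only [hmod, e1, e2]
  · simp [hmod]
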